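-- pv_equiv track=rewrite | github.com/kimotot/pe | py37.py | rightcut
-- ===== SOURCE A (Python) =====
-- def rightcut(n):
--     ans = set()
--
--     t = n // 10
--     while t > 0:
--         ans.add(t)
--         t //= 10
--
--     r = list(ans)
--     r.sort()
--
--     return r
-- ===== SOURCE B (Python) =====
-- def rightcut(n):
--     # count the decimal digits of n, then emit each truncation by a
--     # direct division by the right power of ten -- no set, no sort
--     d = 0
--     while 10 ** d <= n:
--         d += 1
--     return [n // 10 ** (d - k) for k in range(1, d)]
-- ===== Notes on version B (the rewrite author's own statement) =====
-- stated objective: simpler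
-- what changed: Instead of iteratively dividing and collecting intermediate values into a set and sorting, B first counts the digits d of n and then produces each truncation directly by dividing n by the matching power of ten in a comprehension, in ascending order, with no set and no sort.
import Mathlib
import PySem

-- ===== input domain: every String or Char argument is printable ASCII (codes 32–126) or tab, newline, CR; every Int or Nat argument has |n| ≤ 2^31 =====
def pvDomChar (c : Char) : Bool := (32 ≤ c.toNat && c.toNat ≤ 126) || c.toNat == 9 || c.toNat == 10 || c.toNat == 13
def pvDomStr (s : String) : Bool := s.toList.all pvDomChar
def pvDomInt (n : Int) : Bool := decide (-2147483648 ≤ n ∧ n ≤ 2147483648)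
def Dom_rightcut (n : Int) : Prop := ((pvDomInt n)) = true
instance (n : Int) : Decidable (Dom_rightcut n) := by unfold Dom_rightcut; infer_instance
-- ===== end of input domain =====

-- B counts the digits of n first and then emits each truncation directly by dividing n by the
-- matching power of ten, in ascending order, eliminating A's set and sort (objective: simpler).

-- ===== PORT A =====
-- the while loop: collect t, t//10, … into the set while t > 0
def rightcutLoop (t : Int) (ans : PySem.Set Int) : PySem.Set Int :=
  if 0 < t then rightcutLoop (PySem.Int.floordiv t 10) (PySem.Set.add ans t) else ans
termination_by t.toNat
decreasing_by
  rw [PySem.Int.floordiv_eq_ediv_of_pos (by norm_num)]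
  omega

-- r = list(ans); r.sort(): sorted without key, safe over the set's elements
def rightcut (n : Int) : List Int :=
  PySem.List.sorted (rightcutLoop (PySem.Int.floordiv n 10) PySem.Set.empty) (fun x => x) false

-- ===== PORT B =====
-- the digit-count loop 'while 10 ** d <= n: d += 1'; d is a count starting at 0 and only
-- incremented, so a Nat counter is exact
def digitCount (n : Int) (d : Nat) : Nat :=
  if (10 : Int) ^ d ≤ n then digitCount n (d + 1) else d
termination_by (n + 1 - 10 ^ d).toNat
decreasing_by
  have h1 : (1 : Int) ≤ 10 ^ d := one_le_pow₀ (by norm_num)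
  have h2 : (10 : Int) ^ (d + 1) = 10 ^ d * 10 := pow_succ 10 d
  rw [h2]
  omega

-- the comprehension [n // 10 ** (d - k) for k in range(1, d)]; the exponent d - k is ≥ 0 in
-- Python there, so '(… ).toNat' on it is exact
def rightcut_alt (n : Int) : List Int :=
  let d : Int := digitCount n 0
  (PySem.List.pyRange 1 d 1).map (fun k => PySem.Int.floordiv n ((10 : Int) ^ (d - k).toNat))

-- ===== PRECONDITION & SPEC =====
def Spec_rightcut (n : Int) (out : List Int) : Prop := out = rightcut_alt n
instance (n : Int) (out : List Int) : Decidable (Spec_rightcut n out) := by unfold Spec_rightcut; infer_instance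

-- ===== CLAIM (what is proved, stated in full; the proofs are below) =====
def Claim_equal_rightcut : Prop := ∀ (n : Int), Dom_rightcut n → Spec_rightcut n (rightcut n)

-- ===== LEMMAS AND PROOFS =====

-- proof-side reference chain of truncations, ascending
def chain (t : Int) : List Int :=
  if _h : 0 < t then chain (t / 10) ++ [t] else []
termination_by t.toNat
decreasing_by
  have h1 : t / 10 < t := (Int.ediv_lt_iff_lt_mul (by norm_num : (0:Int) < 10)).mpr (by omega)
  have h2 : 0 ≤ t / 10 := Int.ediv_nonneg (le_of_lt _h) (by norm_num)
  omega

theorem chain_pos (t : Int) (h : 0 < t) : chain t = chain (t / 10) ++ [t] := by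
  rw [chain, dif_pos h]

theorem chain_nonpos (t : Int) (h : ¬ 0 < t) : chain t = [] := by
  rw [chain, dif_neg h]

theorem mem_chain {t x : Int} (hx : x ∈ chain t) : 0 < x ∧ x ≤ t := by
  induction t using chain.induct with
  | case1 t ht ih =>
    rw [chain_pos t ht] at hx
    rcases List.mem_append.mp hx with h | h
    · have := ih h
      have hlt : t / 10 < t := (Int.ediv_lt_iff_lt_mul (by norm_num : (0:Int) < 10)).mpr (by omega)
      exact ⟨this.1, by omega⟩
    · simp at h; omega
  | case2 t ht => rw [chain_nonpos t ht] at hx; simp at hx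

theorem chain_pairwise (t : Int) : (chain t).Pairwise (· < ·) := by
  induction t using chain.induct with
  | case1 t ht ih =>
    rw [chain_pos t ht]
    refine List.pairwise_append.mpr ⟨ih, List.pairwise_singleton _ _, ?_⟩
    intro x hx y hy
    simp at hy
    have hb := mem_chain hx
    have hlt : t / 10 < t := (Int.ediv_lt_iff_lt_mul (by norm_num : (0:Int) < 10)).mpr (by omega)
    omega
  | case2 t ht => rw [chain_nonpos t ht]; exact List.Pairwise.nil

-- ---- A side: the set loop collects exactly the chain (reversed) ----

theorem rightcutLoop_eq (t : Int) :
    ∀ s : PySem.Set Int, (∀ x ∈ s, t < x) →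
      rightcutLoop t s = s ++ (chain t).reverse := by
  induction t using chain.induct with
  | case1 t ht ih =>
    intro s hs
    have hnot : t ∉ s := fun h => absurd (hs t h) (by omega)
    have hfd : PySem.Int.floordiv t 10 = t / 10 :=
      PySem.Int.floordiv_eq_ediv_of_pos (by norm_num)
    rw [rightcutLoop, if_pos ht, PySem.Set.add_of_not_mem hnot, hfd, chain_pos t ht]
    have hlt : t / 10 < t := (Int.ediv_lt_iff_lt_mul (by norm_num : (0:Int) < 10)).mpr (by omega)
    rw [ih (s ++ [t]) ?_]
    · simp
    · intro x hx
      rcases List.mem_append.mp hx with h | h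
      · have := hs x h; omega
      · simp at h; omega
  | case2 t ht =>
    intro s hs
    rw [rightcutLoop, if_neg ht, chain_nonpos t ht]
    simp

theorem rightcut_eq_chain (n : Int) : rightcut n = chain (PySem.Int.floordiv n 10) := by
  unfold rightcut
  rw [rightcutLoop_eq _ PySem.Set.empty (by intro x hx; simp [PySem.Set.empty] at hx)]
  simp only [PySem.Set.empty, List.nil_append]
  exact PySem.List.sorted_eq_of_perm_of_pairwise_lt _ _ _
    (List.reverse_perm _).symm (chain_pairwise _)

-- ---- digitCount characterisation ----

theorem dc_upper (n : Int) (d : Nat) : n < 10 ^ digitCount n d := by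
  refine digitCount.induct n (fun d => n < 10 ^ digitCount n d) ?_ ?_ d
  · intro x h ih; rw [digitCount, if_pos h]; exact ih
  · intro x h; rw [digitCount, if_neg h]; omega

theorem dc_lower (n : Int) (d : Nat) :
    (10 : Int) ^ d ≤ n → (10 : Int) ^ (digitCount n d - 1) ≤ n := by
  refine digitCount.induct n
    (fun d => (10 : Int) ^ d ≤ n → (10 : Int) ^ (digitCount n d - 1) ≤ n) ?_ ?_ d
  · intro x h0 ih _
    rw [digitCount, if_pos h0]
    by_cases h1 : (10 : Int) ^ (x + 1) ≤ n
    · exact ih h1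
    · rw [digitCount, if_neg h1]; simpa using h0
  · intro x h0 h; exact absurd h h0

theorem dc_zero_of_nonpos (n : Int) (h : n < 1) : digitCount n 0 = 0 := by
  rw [digitCount, if_neg (by simpa using not_le.mpr h)]

theorem dc_unique (n : Int) (a : Nat) (h1 : n < 10 ^ a)
    (h2 : a = 0 ∨ (10 : Int) ^ (a - 1) ≤ n) : digitCount n 0 = a := by
  by_cases hn : n < 1
  · rcases h2 with rfl | h2
    · exact dc_zero_of_nonpos n hn
    · have : (1 : Int) ≤ 10 ^ (a - 1) := one_le_pow₀ (by norm_num)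
      omega
  · push Not at hn
    have hup : n < 10 ^ digitCount n 0 := dc_upper n 0
    have hlow : (10 : Int) ^ (digitCount n 0 - 1) ≤ n := dc_lower n 0 (by simpa using hn)
    set D := digitCount n 0 with hD
    rcases lt_trichotomy a D with h | h | h
    · have : (10 : Int) ^ a ≤ 10 ^ (D - 1) :=
        pow_le_pow_right₀ (by norm_num) (by omega)
      omega
    · exact h.symm
    · rcases h2 with rfl | h2
      · omega
      · have : (10 : Int) ^ D ≤ 10 ^ (a - 1) :=
          pow_le_pow_right₀ (by norm_num) (by omega)
        omega

theorem dc_pos (n : Int) (h : 0 < n) : 1 ≤ digitCount n 0 := by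
  by_contra hc
  have h0 : digitCount n 0 = 0 := by omega
  have := dc_upper n 0
  rw [h0] at this
  omega

theorem dc_shift (t : Int) (ht : 0 < t) :
    digitCount (t / 10) 0 = digitCount t 0 - 1 := by
  have hD1 := dc_pos t ht
  have hup : t < 10 ^ digitCount t 0 := dc_upper t 0
  have hlow : (10 : Int) ^ (digitCount t 0 - 1) ≤ t := dc_lower t 0 (by simpa using ht)
  set D := digitCount t 0 with hD
  apply dc_unique
  · rw [Int.ediv_lt_iff_lt_mul (by norm_num)]
    calc t < 10 ^ D := hup
    _ = 10 ^ (D - 1) * 10 := by rw [← pow_succ]; congr 1; omega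
  · by_cases h2 : 2 ≤ D
    · right
      rw [Int.le_ediv_iff_mul_le (by norm_num)]
      calc (10:Int) ^ (D - 1 - 1) * 10 = 10 ^ (D - 1) := by rw [← pow_succ]; congr 1; omega
      _ ≤ t := hlow
    · left; omega

-- ---- the chain is the list of direct divisions, ascending ----

theorem chain_eq_map (t : Int) :
    chain t = (List.range (digitCount t 0)).reverse.map (fun k => t / 10 ^ k) := by
  induction t using chain.induct with
  | case1 t ht ih =>
    have hD1 := dc_pos t ht
    rw [chain_pos t ht, ih, dc_shift t ht,
      show digitCount t 0 = (digitCount t 0 - 1) + 1 by omega, List.range_succ_eq_map]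
    simp only [List.reverse_cons, List.map_append, List.map_reverse, List.map_map,
      Nat.add_sub_cancel]
    congr 1
    · congr 1
      apply List.map_congr_left
      intro k _
      simp only [Function.comp_apply, Nat.succ_eq_add_one]
      rw [Int.ediv_ediv_of_nonneg (by norm_num), ← pow_succ']
    · simp
  | case2 t ht =>
    rw [chain_nonpos t ht, dc_zero_of_nonpos t (by omega)]
    simp

-- ---- B side equals the chain ----

theorem rightcut_alt_eq_chain (n : Int) : rightcut_alt n = chain (n / 10) := by
  simp only [rightcut_alt]
  by_cases hn : 0 < n
  · have hD1 := dc_pos n hn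
    rw [chain_eq_map, dc_shift n hn, PySem.List.pyRange_one]
    set D := digitCount n 0 with hD
    rw [List.map_map]
    apply List.ext_getElem
    · simp only [List.length_map, List.length_range, List.length_reverse]
      omega
    · intro i h1 h2
      have hiD : i < D - 1 := by
        simp only [List.length_map, List.length_range, List.length_reverse] at h2
        omega
      simp only [List.getElem_map, List.getElem_reverse, List.length_range,
        Function.comp_apply]
      rw [List.getElem_range, List.getElem_range]
      rw [Int.ediv_ediv_of_nonneg (by norm_num), ← pow_succ',
        PySem.Int.floordiv_eq_ediv_of_pos (pow_pos (by norm_num) _)]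
      congr 2
      omega
  · have hd0 : digitCount n 0 = 0 := dc_zero_of_nonpos n (by omega)
    rw [hd0, chain_nonpos]
    · simp
    · have : n / 10 ≤ 0 / 10 := Int.ediv_le_ediv (by norm_num) (by omega)
      simpa using this

-- ===== VERDICT (by name: the statement is the Claim_ definition above) =====
theorem rightcut_spec : Claim_equal_rightcut := by
  intro n _
  unfold Spec_rightcut
  rw [rightcut_eq_chain, rightcut_alt_eq_chain,
    PySem.Int.floordiv_eq_ediv_of_pos (by norm_num : (0:Int) < 10)]
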